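-- pv_equiv track=rewrite | github.com/yiclwh/-2018 | island I II III IV.py | numIslands3
-- ===== SOURCE A (Python) =====
-- def numIslands3(grid):
--     def dfs(r, c, rows, cols):
--         res = 0
--         if 0 <= r < rows and 0 <= c < cols and grid[r][c] == '1':
--             grid[r][c] = '#'
--             res = 0
--             for d in dirs:
--                 nr, nc = r + d[0], c + d[1]
--                 if nr < 0 or nr > rows - 1 or nc < 0 or nc > cols - 1 or grid[nr][nc] =='0':
--                     res += 1
--             for d in dirs:
--                 nr, nc = r + d[0], c + d[1]
--                 res += dfs(nr, nc, rows, cols)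
--         return res
--     rows = len(grid)
--     cols = len(grid[0])
--     dirs = [[0,1], [1,0], [-1, 0], [0,-1]]
--     res = 0
--     for i in range(rows):
--         for j in range(cols):
--             if grid[i][j] == '1':
--                 res = max(res, dfs(i, j, rows, cols))
--     return res
-- ===== SOURCE B (Python) =====
-- def numIslands3(grid):
--     rows = len(grid)
--     cols = len(grid[0])
--     seen = set()
--
--     def contrib(r, c):
--         n = 0
--         for nr, nc in ((r, c + 1), (r + 1, c), (r - 1, c), (r, c - 1)):
--             if nr < 0 or nr >= rows or nc < 0 or nc >= cols or grid[nr][nc] == '0':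
--                 n += 1
--         return n
--
--     best = 0
--     for i, row in enumerate(grid):
--         for j in range(cols):
--             if row[j] == '1' and (i, j) not in seen:
--                 per = 0
--                 stack = [(i, j)]
--                 while stack:
--                     r, c = stack.pop()
--                     if 0 <= r < rows and 0 <= c < cols and (r, c) not in seen and grid[r][c] == '1':
--                         seen.add((r, c))
--                         per += contrib(r, c)
--                         stack.extend(((r, c - 1), (r - 1, c), (r + 1, c), (r, c + 1)))
--                 best = max(best, per)
--     return best
-- ===== Notes on version B (the rewrite author's own statement) =====
-- stated objective: alternative
-- what changed: The recursive in-place-marking DFS is replaced by an iterative flood fill over an immutable grid using an explicit stack and a separate visited set, with each cell's boundary contribution computed from the original grid (correct because marking only turns '1' cells into '#', which the =='0' test never counts); the grid is no longer mutated.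
import Mathlib
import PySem

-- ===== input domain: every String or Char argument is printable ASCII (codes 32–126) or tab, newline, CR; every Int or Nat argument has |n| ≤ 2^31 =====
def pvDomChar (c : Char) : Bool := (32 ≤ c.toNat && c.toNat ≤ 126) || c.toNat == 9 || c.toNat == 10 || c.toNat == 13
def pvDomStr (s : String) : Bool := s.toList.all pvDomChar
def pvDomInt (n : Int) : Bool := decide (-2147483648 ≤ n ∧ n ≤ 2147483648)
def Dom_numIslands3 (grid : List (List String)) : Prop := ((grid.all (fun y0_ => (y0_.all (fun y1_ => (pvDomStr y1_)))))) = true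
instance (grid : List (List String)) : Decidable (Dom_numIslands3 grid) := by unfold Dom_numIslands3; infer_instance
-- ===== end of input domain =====

-- B replaces A's recursive in-place-marking DFS by an iterative explicit-stack flood fill over the
-- UNCHANGED grid with a separate visited set; equivalence is about the return value only
-- (A mutates the grid, turning visited '1' cells into '#'; B does not mutate it).

-- ===== PORT A =====
-- A-side helpers: grid read grid[r][c] (only evaluated under bounds guards), grid write
-- grid[r][c] = '#', and the count of '1'-cells used as fuel for the guarded recursion.
def pvGetCell (g : List (List String)) (r c : Int) : String :=
  (PySem.List.pyGet? ((PySem.List.pyGet? g r).getD []) c).getD ""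

def pvSetCell (g : List (List String)) (r c : Int) : List (List String) :=
  g.set r.toNat ((g.getD r.toNat []).set c.toNat "#")

def pvCountOnes (g : List (List String)) : Nat :=
  (g.map fun row => row.count "1").sum

def pvDirs : List (Int × Int) := [(0, 1), (1, 0), (-1, 0), (0, -1)]

-- the boundary-count loop of A's dfs: res += 1 for each direction out of bounds or on a '0'
def boundaryA (rows cols r c : Int) (g : List (List String)) (acc : Int) : Int :=
  pvDirs.foldl (fun res d =>
    if r + d.1 < 0 ∨ r + d.1 > rows - 1 ∨ c + d.2 < 0 ∨ c + d.2 > cols - 1 ∨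
        pvGetCell g (r + d.1) (c + d.2) = "0" then res + 1 else res) acc

-- A's dfs; fuel (one unit per call, pvCountOnes g + 1 at each top-level call) makes the
-- recursion total and is sufficient, since every recursive step unmarks a '1'.
def dfsA (rows cols : Int) : Nat → Int → Int → List (List String) → Int × List (List String)
  | 0, _, _, g => (0, g)
  | fuel + 1, r, c, g =>
    if 0 ≤ r ∧ r < rows ∧ 0 ≤ c ∧ c < cols ∧ pvGetCell g r c = "1" then
      let g1 := pvSetCell g r c
      let b := boundaryA rows cols r c g1 0
      pvDirs.foldl (fun p d =>
        let q := dfsA rows cols fuel (r + d.1) (c + d.2) p.2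
        (p.1 + q.1, q.2)) (b, g1)
    else (0, g)

def numIslands3 (grid : List (List String)) : Int :=
  let rows : Int := grid.length
  let cols : Int := (grid.headD []).length
  ((List.range grid.length).foldl (fun st (i : Nat) =>
    (List.range (grid.headD []).length).foldl (fun (st : Int × List (List String)) (j : Nat) =>
      if pvGetCell st.2 (i : Int) (j : Int) = "1" then
        let q := dfsA rows cols (pvCountOnes st.2 + 1) (i : Int) (j : Int) st.2
        (max st.1 q.1, q.2)
      else st) st) ((0 : Int), grid)).1

-- ===== PORT B =====
-- B-side helpers: plain guarded read on the immutable grid, the per-cell boundary contribution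
-- (Source B's contrib), the total number of '1' cells (fuel bound for the while loop), and the
-- explicit-stack flood fill threading the visited set.
def pyAt (g : List (List String)) (r c : Int) : String :=
  (g.getD r.toNat []).getD c.toNat ""

def onesTotal (g : List (List String)) : Nat :=
  g.foldl (fun n row => n + row.count "1") 0

def contribB (rows cols : Int) (g : List (List String)) (r c : Int) : Int :=
  [(r, c + 1), (r + 1, c), (r - 1, c), (r, c - 1)].foldl (fun n p =>
    if p.1 < 0 ∨ rows ≤ p.1 ∨ p.2 < 0 ∨ cols ≤ p.2 ∨ pyAt g p.1 p.2 = "0" then n + 1 else n) 0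

-- Source B's while loop: Python stack top = end of the list = head of the Lean list, so
-- extend(((r,c-1),(r-1,c),(r+1,c),(r,c+1))) puts (r,c+1) on top.  Fuel: one unit per pop;
-- 4 * onesTotal g + 1 suffices, since only an unseen '1' cell pushes (four cells).
def floodB (rows cols : Int) (g : List (List String)) :
    Nat → List (Int × Int) → Int → PySem.Set (Int × Int) → Int × PySem.Set (Int × Int)
  | 0, _, per, seen => (per, seen)
  | _ + 1, [], per, seen => (per, seen)
  | fuel + 1, (r, c) :: rest, per, seen =>
    if 0 ≤ r ∧ r < rows ∧ 0 ≤ c ∧ c < cols ∧ ¬ (r, c) ∈ seen ∧ pyAt g r c = "1" then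
      floodB rows cols g fuel ((r, c + 1) :: (r + 1, c) :: (r - 1, c) :: (r, c - 1) :: rest)
        (per + contribB rows cols g r c) (PySem.Set.add seen (r, c))
    else floodB rows cols g fuel rest per seen

def numIslands3_alt (grid : List (List String)) : Int :=
  let rows : Int := grid.length
  let cols : Int := (grid.headD []).length
  ((PySem.List.enumerate grid 0).foldl (fun (st : Int × PySem.Set (Int × Int)) p =>
    (List.range (grid.headD []).length).foldl (fun st (j : Nat) =>
      if p.2.getD j "" = "1" ∧ ¬ (p.1, (j : Int)) ∈ st.2 then
        let q := floodB rows cols grid (4 * onesTotal grid + 1) [(p.1, (j : Int))] 0 st.2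
        (max st.1 q.1, q.2)
      else st) st) ((0 : Int), PySem.Set.empty)).1

-- ===== PRECONDITION & SPEC =====
-- Pre_ excludes exactly the inputs on which A raises IndexError: the empty grid (len(grid[0]))
-- and ragged grids with a row shorter than the first row (grid[i][j] for j < len(grid[0])).
def Pre_numIslands3 (grid : List (List String)) : Prop :=
  grid ≠ [] ∧ ∀ row ∈ grid, (grid.headD []).length ≤ row.length
instance (grid : List (List String)) : Decidable (Pre_numIslands3 grid) := by
  unfold Pre_numIslands3; infer_instance
def pvWitness_numIslands3 : List (List String) := [["1", "0"], ["1", "1"]]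

def Spec_numIslands3 (grid : List (List String)) (out : Int) : Prop := out = numIslands3_alt grid
instance (grid : List (List String)) (out : Int) : Decidable (Spec_numIslands3 grid out) := by
  unfold Spec_numIslands3; infer_instance

-- ===== CLAIM (what is proved, stated in full; the proofs are below) =====
def Claim_equal_numIslands3 : Prop := ∀ (grid : List (List String)), Dom_numIslands3 grid →
  Pre_numIslands3 grid → Spec_numIslands3 grid (numIslands3 grid)

-- ===== LEMMAS AND PROOFS =====

-- A's grid state, reconstructed from the original grid and B's visited set
def markGrid (g : List (List String)) (seen : List (Int × Int)) : List (List String) :=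
  g.mapIdx fun i row => row.mapIdx fun j v =>
    if ((i : Int), (j : Int)) ∈ seen then "#" else v

-- invariant on B's visited set: distinct in-bounds cells whose original value is "1"
def GoodSeen (g : List (List String)) (cols : Int) (seen : List (Int × Int)) : Prop :=
  seen.Nodup ∧ ∀ p ∈ seen, ∃ (i j : Nat), p = ((i : Int), (j : Int)) ∧
    i < g.length ∧ (j : Int) < cols ∧ j < (g.getD i []).length ∧ (g.getD i []).getD j "" = "1"

-- dfsA threaded over a list of seed cells, each started with its exact fuel; the reference
-- computation both ports are related to.
def runSeq (rows cols : Int) : List (Int × Int) → List (List String) → Int × List (List String)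
  | [], g => (0, g)
  | (r, c) :: s, g =>
    let p := dfsA rows cols (pvCountOnes g + 1) r c g
    let q := runSeq rows cols s p.2
    (p.1 + q.1, q.2)

theorem onesTotal_eq (g : List (List String)) : onesTotal g = pvCountOnes g := by
  suffices h : ∀ n : Nat, g.foldl (fun n row => n + row.count "1") n = n + pvCountOnes g by
    simpa [onesTotal] using h 0
  induction g with
  | nil => intro n; simp [pvCountOnes]
  | cons r t ih =>
    intro n
    simp only [List.foldl_cons, ih, pvCountOnes, List.map_cons, List.sum_cons]
    omega

theorem markGrid_nil (g : List (List String)) : markGrid g [] = g := by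
  unfold markGrid
  apply List.ext_getElem (by simp)
  intro i h1 h2
  rw [List.getElem_mapIdx]
  apply List.ext_getElem (by simp)
  intro j h3 h4
  rw [List.getElem_mapIdx]
  simp

theorem markGrid_get (g : List (List String)) (seen : List (Int × Int)) (i j : Nat)
    (hi : i < g.length) (hj : j < (g.getD i []).length) :
    ((markGrid g seen).getD i []).getD j "" =
      if ((i : Int), (j : Int)) ∈ seen then "#" else (g.getD i []).getD j "" := by
  unfold markGrid
  have hi' : i < (g.mapIdx fun i row => row.mapIdx fun j v =>
      if ((i : Int), (j : Int)) ∈ seen then "#" else v).length := by simpa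
  rw [List.getD_eq_getElem _ _ hi', List.getElem_mapIdx]
  have hj' : j < (g[i].mapIdx fun j v => if ((i : Int), (j : Int)) ∈ seen then "#" else v).length := by
    simpa using (by rwa [List.getD_eq_getElem _ _ hi] at hj)
  rw [List.getD_eq_getElem _ _ hj', List.getElem_mapIdx]
  rw [List.getD_eq_getElem _ _ hi, List.getD_eq_getElem]

theorem markGrid_read (g : List (List String)) (seen : List (Int × Int)) (r c : Int)
    (hr0 : 0 ≤ r) (hr : r.toNat < g.length) (hc0 : 0 ≤ c) (hc : c.toNat < (g.getD r.toNat []).length) :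
    pvGetCell (markGrid g seen) r c =
      if (r, c) ∈ seen then "#" else pyAt g r c := by
  have hr' : r = ((r.toNat : Nat) : Int) := by omega
  have hc' : c = ((c.toNat : Nat) : Int) := by omega
  unfold pvGetCell pyAt
  rw [PySem.List.pyGet?_of_nonneg _ hr0]
  have h1 : (markGrid g seen)[r.toNat]? = some ((markGrid g seen).getD r.toNat []) := by
    rw [List.getD_eq_getElem _ _ (by simpa [markGrid] using hr), List.getElem?_eq_getElem]
  rw [h1, Option.getD_some, PySem.List.pyGet?_of_nonneg _ hc0]
  have hlen : c.toNat < ((markGrid g seen).getD r.toNat []).length := by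
    unfold markGrid
    rw [List.getD_eq_getElem _ _ (by simpa using hr), List.getElem_mapIdx]
    simpa using (by rwa [List.getD_eq_getElem _ _ hr] at hc)
  rw [List.getElem?_eq_getElem hlen, Option.getD_some, ← List.getD_eq_getElem _ "" hlen]
  rw [markGrid_get g seen r.toNat c.toNat hr hc, ← hr', ← hc']

theorem markGrid_set (g : List (List String)) (seen : List (Int × Int)) (r c : Int)
    (hr0 : 0 ≤ r) (hr : r.toNat < g.length) (hc0 : 0 ≤ c) :
    markGrid g (seen ++ [(r, c)]) = pvSetCell (markGrid g seen) r c := by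
  have hr' : ((r.toNat : Nat) : Int) = r := by omega
  have hc' : ((c.toNat : Nat) : Int) = c := by omega
  unfold pvSetCell markGrid
  apply List.ext_getElem (by simp)
  intro i h1 h2
  rw [List.getElem_mapIdx, List.getElem_set]
  by_cases hir : r.toNat = i
  · subst hir
    rw [if_pos rfl]
    have hrow : ((g.mapIdx fun i row => row.mapIdx fun j v =>
        if ((i : Int), (j : Int)) ∈ seen then "#" else v).getD r.toNat [])
        = g[r.toNat].mapIdx fun j v => if ((r.toNat : Int), (j : Int)) ∈ seen then "#" else v := by
      rw [List.getD_eq_getElem _ _ (by simpa using hr), List.getElem_mapIdx]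
    rw [hrow]
    apply List.ext_getElem (by simp)
    intro j h3 h4
    rw [List.getElem_mapIdx, List.getElem_set]
    by_cases hjc : c.toNat = j
    · subst hjc
      rw [if_pos rfl, if_pos (by simp [hr', hc'])]
    · rw [if_neg hjc, List.getElem_mapIdx]
      have : (((r.toNat : Nat) : Int), ((j : Nat) : Int)) ∈ seen ++ [(r, c)]
          ↔ (((r.toNat : Nat) : Int), ((j : Nat) : Int)) ∈ seen := by
        simp only [List.mem_append, List.mem_singleton, Prod.mk.injEq]
        constructor
        · rintro (h | ⟨h5, h6⟩)
          · exact h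
          · omega
        · exact Or.inl
      simp only [this]
  · rw [if_neg hir, List.getElem_mapIdx]
    apply List.ext_getElem (by simp)
    intro j h3 h4
    rw [List.getElem_mapIdx, List.getElem_mapIdx]
    have : (((i : Nat) : Int), ((j : Nat) : Int)) ∈ seen ++ [(r, c)]
        ↔ (((i : Nat) : Int), ((j : Nat) : Int)) ∈ seen := by
      simp only [List.mem_append, List.mem_singleton, Prod.mk.injEq]
      constructor
      · rintro (h | ⟨h5, h6⟩)
        · exact h
        · omega
      · exact Or.inl
    simp only [this]

theorem count_mapIdx_le (row : List String) :
    ∀ (f : Nat → String → String), (∀ j v, f j v = v ∨ f j v = "#") →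
      (row.mapIdx f).count "1" ≤ row.count "1" := by
  induction row with
  | nil => intro f hf; simp
  | cons x xs ih =>
    intro f hf
    rw [List.mapIdx_cons]
    simp only [List.count_cons]
    have h1 := ih (fun i => f (i + 1)) (fun i v => hf (i + 1) v)
    rcases hf 0 x with h0 | h0 <;> rw [h0]
    · exact Nat.add_le_add_right h1 _
    · have hne : ¬ (("#" : String) == "1") = true := by decide
      rw [if_neg hne]
      exact le_trans h1 (Nat.le_add_right _ _)

theorem countOnes_mapIdx_le (g : List (List String)) :
    ∀ (F : Nat → List String → List String),
      (∀ i row, (F i row).count "1" ≤ row.count "1") →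
      pvCountOnes (g.mapIdx F) ≤ pvCountOnes g := by
  induction g with
  | nil => intro F hF; simp [pvCountOnes]
  | cons r t ih =>
    intro F hF
    rw [List.mapIdx_cons]
    simp only [pvCountOnes, List.map_cons, List.sum_cons]
    have h1 := ih (fun i => F (i + 1)) (fun i row => hF (i + 1) row)
    have h0 := hF 0 r
    simp only [pvCountOnes] at h1
    omega

theorem countOnes_mark_le (g : List (List String)) (seen : List (Int × Int)) :
    pvCountOnes (markGrid g seen) ≤ pvCountOnes g := by
  unfold markGrid
  apply countOnes_mapIdx_le
  intro i row
  apply count_mapIdx_le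
  intro j v
  by_cases h : ((i : Int), (j : Int)) ∈ seen
  · right; simp [h]
  · left; simp [h]

theorem count_set_row (row : List String) (n : Nat) (h : row[n]? = some "1") :
    (row.set n "#").count "1" + 1 = row.count "1" := by
  induction row generalizing n with
  | nil => simp at h
  | cons x xs ih =>
    cases n with
    | zero =>
      simp only [List.getElem?_cons_zero, Option.some.injEq] at h
      subst h
      simp
    | succ m =>
      simp only [List.getElem?_cons_succ] at h
      have := ih m h
      simp only [List.set_cons_succ, List.count_cons]
      split <;> omega

theorem countOnes_set_list (g : List (List String)) (i : Nat) (row row' : List String)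
    (h : g[i]? = some row) :
    pvCountOnes (g.set i row') + row.count "1" = pvCountOnes g + row'.count "1" := by
  induction g generalizing i with
  | nil => simp at h
  | cons y ys ih =>
    cases i with
    | zero =>
      simp only [List.getElem?_cons_zero, Option.some.injEq] at h
      subst h
      simp [pvCountOnes]
      omega
    | succ m =>
      simp only [List.getElem?_cons_succ] at h
      have := ih m h
      simp only [List.set_cons_succ, pvCountOnes, List.map_cons, List.sum_cons] at *
      omega

theorem countOnes_set (g : List (List String)) (r c : Int) (hr : 0 ≤ r) (hc : 0 ≤ c)
    (h1 : pvGetCell g r c = "1") : pvCountOnes (pvSetCell g r c) + 1 = pvCountOnes g := by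
  unfold pvGetCell at h1
  rw [PySem.List.pyGet?_of_nonneg g hr] at h1
  cases hrow : g[r.toNat]? with
  | none => rw [hrow] at h1; simp [PySem.List.pyGet?] at h1
  | some row =>
    rw [hrow] at h1
    simp only [Option.getD_some] at h1
    rw [PySem.List.pyGet?_of_nonneg _ hc] at h1
    cases hcell : row[c.toNat]? with
    | none => rw [hcell] at h1; simp at h1
    | some s =>
      rw [hcell] at h1
      simp only [Option.getD_some] at h1
      subst h1
      have hgd : g.getD r.toNat [] = row := by
        rw [List.getD_eq_getElem?_getD, hrow]; rfl
      unfold pvSetCell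
      rw [hgd]
      have h2 := countOnes_set_list g r.toNat row (row.set c.toNat "#") hrow
      have h3 := count_set_row row c.toNat hcell
      omega

theorem foldl_snd_le {α : Type} (f : Int × List (List String) → α → Int × List (List String))
    (hf : ∀ p d, pvCountOnes (f p d).2 ≤ pvCountOnes p.2) :
    ∀ (l : List α) (p : Int × List (List String)),
      pvCountOnes ((l.foldl f p).2) ≤ pvCountOnes p.2 := by
  intro l
  induction l with
  | nil => intro p; simp
  | cons d l ih =>
    intro p
    simp only [List.foldl_cons]
    exact le_trans (ih (f p d)) (hf p d)

theorem countOnes_dfsA_le (rows cols : Int) :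
    ∀ (fuel : Nat) (r c : Int) (g : List (List String)),
      pvCountOnes (dfsA rows cols fuel r c g).2 ≤ pvCountOnes g := by
  intro fuel
  induction fuel with
  | zero => intro r c g; simp [dfsA]
  | succ fuel ih =>
    intro r c g
    rw [dfsA]
    split
    case isTrue h =>
      have hset := countOnes_set g r c h.1 h.2.2.1 h.2.2.2.2
      refine le_trans (foldl_snd_le _ ?_ pvDirs _) (by simp; omega)
      intro p d
      exact ih (r + d.1) (c + d.2) p.2
    case isFalse h => simp

theorem dfsA_fuel_congr (rows cols : Int) :
    ∀ (f f' : Nat) (r c : Int) (g : List (List String)),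
      pvCountOnes g < f → pvCountOnes g < f' →
      dfsA rows cols f r c g = dfsA rows cols f' r c g := by
  intro f
  induction f with
  | zero => intro f' r c g h; exact absurd h (by omega)
  | succ f ih =>
    intro f' r c g hf hf'
    cases f' with
    | zero => exact absurd hf' (by omega)
    | succ f' =>
      rw [dfsA, dfsA]
      split
      case isTrue h =>
        have hset := countOnes_set g r c h.1 h.2.2.1 h.2.2.2.2
        simp only [pvDirs, List.foldl]
        set g1 := pvSetCell g r c with hg1
        have e1 : dfsA rows cols f (r + 0) (c + 1) g1 = dfsA rows cols f' (r + 0) (c + 1) g1 :=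
          ih f' _ _ _ (by omega) (by omega)
        rw [e1]
        set d1 := dfsA rows cols f' (r + 0) (c + 1) g1 with hd1
        have hle1 : pvCountOnes d1.2 ≤ pvCountOnes g1 := countOnes_dfsA_le rows cols f' _ _ _
        have e2 : dfsA rows cols f (r + 1) (c + 0) d1.2 = dfsA rows cols f' (r + 1) (c + 0) d1.2 :=
          ih f' _ _ _ (by omega) (by omega)
        rw [e2]
        set d2 := dfsA rows cols f' (r + 1) (c + 0) d1.2 with hd2
        have hle2 : pvCountOnes d2.2 ≤ pvCountOnes d1.2 := countOnes_dfsA_le rows cols f' _ _ _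
        have e3 : dfsA rows cols f (r + -1) (c + 0) d2.2 = dfsA rows cols f' (r + -1) (c + 0) d2.2 :=
          ih f' _ _ _ (by omega) (by omega)
        rw [e3]
        set d3 := dfsA rows cols f' (r + -1) (c + 0) d2.2 with hd3
        have hle3 : pvCountOnes d3.2 ≤ pvCountOnes d2.2 := countOnes_dfsA_le rows cols f' _ _ _
        have e4 : dfsA rows cols f (r + 0) (c + -1) d3.2 = dfsA rows cols f' (r + 0) (c + -1) d3.2 :=
          ih f' _ _ _ (by omega) (by omega)
        rw [e4]
      case isFalse h => rfl

theorem runSeq_step (rows cols r c : Int) (s : List (Int × Int)) (g : List (List String))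
    (h : 0 ≤ r ∧ r < rows ∧ 0 ≤ c ∧ c < cols ∧ pvGetCell g r c = "1") :
    runSeq rows cols ((r, c) :: s) g =
      (boundaryA rows cols r c (pvSetCell g r c) 0 +
        (runSeq rows cols ((r, c + 1) :: (r + 1, c) :: (r - 1, c) :: (r, c - 1) :: s)
          (pvSetCell g r c)).1,
       (runSeq rows cols ((r, c + 1) :: (r + 1, c) :: (r - 1, c) :: (r, c - 1) :: s)
          (pvSetCell g r c)).2) := by
  have hset := countOnes_set g r c h.1 h.2.2.1 h.2.2.2.2
  simp only [runSeq]
  rw [dfsA]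
  rw [if_pos h]
  simp only [pvDirs, List.foldl, add_zero, ← sub_eq_add_neg]
  set g1 := pvSetCell g r c with hg1
  have e1 : dfsA rows cols (pvCountOnes g) r (c + 1) g1
      = dfsA rows cols (pvCountOnes g1 + 1) r (c + 1) g1 :=
    dfsA_fuel_congr rows cols _ _ _ _ _ (by omega) (by omega)
  rw [e1]
  set d1 := dfsA rows cols (pvCountOnes g1 + 1) r (c + 1) g1 with hd1
  have hle1 : pvCountOnes d1.2 ≤ pvCountOnes g1 := countOnes_dfsA_le rows cols _ _ _ _
  have e2 : dfsA rows cols (pvCountOnes g) (r + 1) c d1.2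
      = dfsA rows cols (pvCountOnes d1.2 + 1) (r + 1) c d1.2 :=
    dfsA_fuel_congr rows cols _ _ _ _ _ (by omega) (by omega)
  rw [e2]
  set d2 := dfsA rows cols (pvCountOnes d1.2 + 1) (r + 1) c d1.2 with hd2
  have hle2 : pvCountOnes d2.2 ≤ pvCountOnes d1.2 := countOnes_dfsA_le rows cols _ _ _ _
  have e3 : dfsA rows cols (pvCountOnes g) (r - 1) c d2.2
      = dfsA rows cols (pvCountOnes d2.2 + 1) (r - 1) c d2.2 :=
    dfsA_fuel_congr rows cols _ _ _ _ _ (by omega) (by omega)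
  rw [e3]
  set d3 := dfsA rows cols (pvCountOnes d2.2 + 1) (r - 1) c d2.2 with hd3
  have hle3 : pvCountOnes d3.2 ≤ pvCountOnes d2.2 := countOnes_dfsA_le rows cols _ _ _ _
  have e4 : dfsA rows cols (pvCountOnes g) r (c - 1) d3.2
      = dfsA rows cols (pvCountOnes d3.2 + 1) r (c - 1) d3.2 :=
    dfsA_fuel_congr rows cols _ _ _ _ _ (by omega) (by omega)
  rw [e4]
  simp only [Prod.mk.injEq]
  constructor
  · ring
  · trivial

-- the per-cell boundary contribution agrees between A (on the marked grid) and B (on the original)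
-- one direction's condition, A (on the marked grid) vs B (on the original grid)
theorem cond_eq (g : List (List String)) (cols : Int)
    (hcols : ∀ i, i < g.length → cols ≤ ((g.getD i []).length : Int))
    (seen : List (Int × Int)) (hseen : GoodSeen g cols seen) (nr nc : Int) :
    (nr < 0 ∨ (g.length : Int) ≤ nr ∨ nc < 0 ∨ cols ≤ nc ∨ pyAt g nr nc = "0")
      = (nr < 0 ∨ nr > (g.length : Int) - 1 ∨ nc < 0 ∨ nc > cols - 1 ∨
          pvGetCell (markGrid g seen) nr nc = "0") := by
  apply propext
  by_cases hb : 0 ≤ nr ∧ nr < (g.length : Int) ∧ 0 ≤ nc ∧ nc < cols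
  · have hrn : nr.toNat < g.length := by omega
    have hcn : nc.toNat < (g.getD nr.toNat []).length := by
      have := hcols nr.toNat hrn
      omega
    rw [markGrid_read g seen nr nc hb.1 hrn hb.2.2.1 hcn]
    by_cases hs : (nr, nc) ∈ seen
    · obtain ⟨i, j, hp, hi, hjc, hj, hval⟩ := hseen.2 _ hs
      have hval' : pyAt g nr nc = "1" := by
        have hni : nr = (i : Int) := congrArg Prod.fst hp
        have hnj : nc = (j : Int) := congrArg Prod.snd hp
        unfold pyAt
        rw [hni, hnj]
        simpa using hval
      rw [if_pos hs]
      apply iff_of_false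
      · rintro (h | h | h | h | h)
        · omega
        · omega
        · omega
        · omega
        · rw [hval'] at h; exact absurd h (by decide)
      · rintro (h | h | h | h | h)
        · omega
        · omega
        · omega
        · omega
        · exact absurd h (by decide)
    · rw [if_neg hs]
      exact or_congr Iff.rfl (or_congr (by omega) (or_congr Iff.rfl (or_congr (by omega) Iff.rfl)))
  · have hor : nr < 0 ∨ (g.length : Int) ≤ nr ∨ nc < 0 ∨ cols ≤ nc := by omega
    apply iff_of_true
    · rcases hor with h | h | h | h
      · exact Or.inl h
      · exact Or.inr (Or.inl h)
      · exact Or.inr (Or.inr (Or.inl h))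
      · exact Or.inr (Or.inr (Or.inr (Or.inl h)))
    · rcases hor with h | h | h | h
      · exact Or.inl h
      · exact Or.inr (Or.inl (by omega))
      · exact Or.inr (Or.inr (Or.inl h))
      · exact Or.inr (Or.inr (Or.inr (Or.inl (by omega))))

theorem contrib_eq (g : List (List String)) (cols : Int)
    (hcols : ∀ i, i < g.length → cols ≤ ((g.getD i []).length : Int))
    (seen : List (Int × Int)) (hseen : GoodSeen g cols seen) (r c : Int) :
    contribB (g.length : Int) cols g r c = boundaryA (g.length : Int) cols r c (markGrid g seen) 0 := by
  have e := cond_eq g cols hcols seen hseen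
  simp only [contribB, boundaryA, pvDirs, List.foldl, add_zero, ← sub_eq_add_neg, e]

-- the pop guard of B's while loop, against A's dfs guard on the marked grid
theorem guard_iff (g : List (List String)) (cols : Int)
    (hcols : ∀ i, i < g.length → cols ≤ ((g.getD i []).length : Int))
    (seen : List (Int × Int)) (r c : Int) :
    (0 ≤ r ∧ r < (g.length : Int) ∧ 0 ≤ c ∧ c < cols ∧ ¬ (r, c) ∈ seen ∧ pyAt g r c = "1")
      ↔ (0 ≤ r ∧ r < (g.length : Int) ∧ 0 ≤ c ∧ c < cols ∧
          pvGetCell (markGrid g seen) r c = "1") := by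
  constructor
  · rintro ⟨h1, h2, h3, h4, h5, h6⟩
    refine ⟨h1, h2, h3, h4, ?_⟩
    rw [markGrid_read g seen r c h1 (by omega) h3
      (by have := hcols r.toNat (by omega); omega), if_neg h5]
    exact h6
  · rintro ⟨h1, h2, h3, h4, h6⟩
    have hrn : r.toNat < g.length := by omega
    have hcn : c.toNat < (g.getD r.toNat []).length := by
      have := hcols r.toNat hrn; omega
    rw [markGrid_read g seen r c h1 hrn h3 hcn] at h6
    by_cases hs : (r, c) ∈ seen
    · rw [if_pos hs] at h6; exact absurd h6 (by decide)
    · rw [if_neg hs] at h6; exact ⟨h1, h2, h3, h4, hs, h6⟩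

-- B's while loop simulates A's dfs threaded over the stack
theorem flood_simB (g : List (List String)) (cols : Int)
    (hcols : ∀ i, i < g.length → cols ≤ ((g.getD i []).length : Int)) :
    ∀ (fuel : Nat) (stack : List (Int × Int)) (per : Int) (seen : List (Int × Int)),
      GoodSeen g cols seen →
      stack.length + 4 * pvCountOnes (markGrid g seen) ≤ fuel →
      (floodB (g.length : Int) cols g fuel stack per seen).1
          = per + (runSeq (g.length : Int) cols stack (markGrid g seen)).1
        ∧ markGrid g (floodB (g.length : Int) cols g fuel stack per seen).2
          = (runSeq (g.length : Int) cols stack (markGrid g seen)).2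
        ∧ GoodSeen g cols (floodB (g.length : Int) cols g fuel stack per seen).2 := by
  intro fuel
  induction fuel with
  | zero =>
    intro stack per seen hgood hlen
    have hnil : stack = [] := by
      cases stack with
      | nil => rfl
      | cons a s => simp at hlen
    subst hnil
    refine ⟨by simp [floodB, runSeq], by simp [floodB, runSeq], ?_⟩
    simpa [floodB] using hgood
  | succ fuel ih =>
    intro stack per seen hgood hlen
    cases stack with
    | nil =>
      refine ⟨by simp [floodB, runSeq], by simp [floodB, runSeq], ?_⟩
      simpa [floodB] using hgood
    | cons rc rest =>
      obtain ⟨r, c⟩ := rc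
      rw [floodB]
      by_cases hB : 0 ≤ r ∧ r < (g.length : Int) ∧ 0 ≤ c ∧ c < cols ∧
          ¬ (r, c) ∈ seen ∧ pyAt g r c = "1"
      · rw [if_pos hB]
        have hA := (guard_iff g cols hcols seen r c).mp hB
        have hrn : r.toNat < g.length := by omega
        have hcn : c.toNat < (g.getD r.toNat []).length := by
          have := hcols r.toNat hrn; omega
        have hadd : PySem.Set.add seen (r, c) = seen ++ [(r, c)] :=
          PySem.Set.add_of_not_mem hB.2.2.2.2.1
        have hmark : markGrid g (seen ++ [(r, c)]) = pvSetCell (markGrid g seen) r c :=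
          markGrid_set g seen r c hB.1 hrn hB.2.2.1
        have hcount : pvCountOnes (pvSetCell (markGrid g seen) r c) + 1
            = pvCountOnes (markGrid g seen) :=
          countOnes_set (markGrid g seen) r c hA.1 hA.2.2.1 hA.2.2.2.2
        have hgood' : GoodSeen g cols (PySem.Set.add seen (r, c)) := by
          rw [hadd]
          constructor
          · rw [List.nodup_append]
            refine ⟨hgood.1, List.nodup_singleton _, ?_⟩
            intro x hx b hb
            rw [List.mem_singleton] at hb
            subst hb
            exact fun he => hB.2.2.2.2.1 (he ▸ hx)
          · intro p hp
            rcases List.mem_append.mp hp with hp | hp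
            · exact hgood.2 p hp
            · rw [List.mem_singleton] at hp
              subst hp
              refine ⟨r.toNat, c.toNat, by simp [Prod.ext_iff]; omega, hrn, by omega, hcn, ?_⟩
              have h6 := hB.2.2.2.2.2
              unfold pyAt at h6
              exact h6
        have hfuel' : ((r, c + 1) :: (r + 1, c) :: (r - 1, c) :: (r, c - 1) :: rest).length
            + 4 * pvCountOnes (markGrid g (PySem.Set.add seen (r, c))) ≤ fuel := by
          rw [hadd, hmark]
          simp only [List.length_cons] at hlen ⊢
          omega
        have hc' : contribB (g.length : Int) cols g r c
            = boundaryA (g.length : Int) cols r c (markGrid g (PySem.Set.add seen (r, c))) 0 :=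
          contrib_eq g cols hcols _ hgood' r c
        have ih' := ih ((r, c + 1) :: (r + 1, c) :: (r - 1, c) :: (r, c - 1) :: rest)
          (per + contribB (g.length : Int) cols g r c) (PySem.Set.add seen (r, c)) hgood' hfuel'
        rw [hadd] at ih' hc' ⊢
        rw [hmark] at ih' hc'
        obtain ⟨ih1, ih2, ih3⟩ := ih'
        have hst := runSeq_step (g.length : Int) cols r c rest (markGrid g seen) hA
        refine ⟨?_, ?_, ih3⟩
        · simp only [hst]
          rw [ih1, hc']
          ring
        · simp only [hst]
          exact ih2
      · rw [if_neg hB]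
        have hA : ¬ (0 ≤ r ∧ r < (g.length : Int) ∧ 0 ≤ c ∧ c < cols ∧
            pvGetCell (markGrid g seen) r c = "1") :=
          fun hA => hB ((guard_iff g cols hcols seen r c).mpr hA)
        obtain ⟨ih1, ih2, ih3⟩ := ih rest per seen hgood (by simp at hlen ⊢; omega)
        refine ⟨?_, ?_, ih3⟩
        · simp only [runSeq]
          rw [dfsA, if_neg hA]
          rw [ih1]
          simp
        · simp only [runSeq]
          rw [dfsA, if_neg hA]
          simpa [runSeq] using ih2

-- fold two different loops in lockstep along the same index list, preserving a relation
theorem foldl_rel_mem {α β γ : Type} (f : β → α → β) (f' : γ → α → γ) (R : β → γ → Prop)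
    (l : List α) (h : ∀ a ∈ l, ∀ b c, R b c → R (f b a) (f' c a)) :
    ∀ b c, R b c → R (l.foldl f b) (l.foldl f' c) := by
  induction l with
  | nil => intro b c hR; simpa using hR
  | cons a l ih =>
    intro b c hR
    simp only [List.foldl_cons]
    exact ih (fun a ha => h a (List.mem_cons_of_mem _ ha)) _ _ (h a (List.mem_cons_self) b c hR)

-- ===== VERDICT (by name: the statement is the Claim_ definition above) =====
theorem numIslands3_spec : Claim_equal_numIslands3 := by
  intro grid _dom hpre
  show numIslands3 grid = numIslands3_alt grid
  obtain ⟨hne, hrag⟩ := hpre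
  have hcols : ∀ i, i < grid.length →
      ((grid.headD []).length : Int) ≤ ((grid.getD i []).length : Int) := by
    intro i hi
    have hmem : grid.getD i [] ∈ grid := by
      rw [List.getD_eq_getElem _ _ hi]
      exact List.getElem_mem _
    exact_mod_cast hrag _ hmem
  simp only [numIslands3, numIslands3_alt]
  rw [PySem.List.enumerate_eq_map_pyRange grid ([] : List String)]
  simp only [PySem.List.len, PySem.List.pyRange_zero_natCast, List.map_map, List.foldl_map,
    Function.comp]
  refine (foldl_rel_mem _ _
    (fun (a : Int × List (List String)) (b : Int × PySem.Set (Int × Int)) =>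
      a.1 = b.1 ∧ a.2 = markGrid grid b.2 ∧ GoodSeen grid ((grid.headD []).length : Int) b.2)
    (List.range grid.length) ?_ ((0 : Int), grid) ((0 : Int), PySem.Set.empty)
    ⟨rfl, (markGrid_nil grid).symm,
      ⟨List.nodup_nil, by intro p hp; exact absurd hp (by simp [PySem.Set.empty])⟩⟩).1
  intro i hi stA stB hR
  refine foldl_rel_mem _ _
    (fun (a : Int × List (List String)) (b : Int × PySem.Set (Int × Int)) =>
      a.1 = b.1 ∧ a.2 = markGrid grid b.2 ∧ GoodSeen grid ((grid.headD []).length : Int) b.2)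
    (List.range (grid.headD []).length) ?_ stA stB hR
  intro j hj stA stB hR
  rw [List.mem_range] at hi
  rw [List.mem_range] at hj
  obtain ⟨hfst, hsnd, hgood⟩ := hR
  have hrowlen : j < (grid.getD i []).length := by
    have := hcols i hi; omega
  have hread : pvGetCell stA.2 ((i : Nat) : Int) ((j : Nat) : Int) =
      if (((i : Nat) : Int), ((j : Nat) : Int)) ∈ stB.2 then "#"
      else pyAt grid ((i : Nat) : Int) ((j : Nat) : Int) := by
    rw [hsnd]
    exact markGrid_read grid stB.2 ((i : Nat) : Int) ((j : Nat) : Int)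
      (by omega) (by simpa using hi) (by omega) (by simpa using hrowlen)
  have hgetd : PySem.List.pyGetD grid ((i : Nat) : Int) [] = grid.getD i [] :=
    PySem.List.pyGetD_natCast grid i []
  have hpyat : pyAt grid ((i : Nat) : Int) ((j : Nat) : Int) = (grid.getD i []).getD j "" := by
    unfold pyAt
    simp
  by_cases hmem : (((i : Nat) : Int), ((j : Nat) : Int)) ∈ stB.2
  · rw [if_pos hmem] at hread
    rw [if_neg (by rw [hread]; exact (by decide : ¬ ("#" : String) = "1"))]
    rw [if_neg (by rintro ⟨h1, h2⟩; exact h2 hmem)]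
    exact ⟨hfst, hsnd, hgood⟩
  · rw [if_neg hmem] at hread
    by_cases hone : (grid.getD i []).getD j "" = "1"
    · rw [if_pos (by rw [hread, hpyat]; exact hone)]
      rw [if_pos ⟨by rw [hgetd]; exact hone, hmem⟩]
      have hf := flood_simB grid ((grid.headD []).length : Int) hcols
        (4 * onesTotal grid + 1) [(((i : Nat) : Int), ((j : Nat) : Int))] 0 stB.2 hgood
        (by
          have h1 := countOnes_mark_le grid stB.2
          rw [onesTotal_eq]
          simp only [List.length_cons, List.length_nil]
          omega)
      rw [← hsnd] at hf
      obtain ⟨hf1, hf2, hf3⟩ := hf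
      have hrs : runSeq (grid.length : Int) ((grid.headD []).length : Int)
          [(((i : Nat) : Int), ((j : Nat) : Int))] stA.2
          = ((dfsA (grid.length : Int) ((grid.headD []).length : Int)
              (pvCountOnes stA.2 + 1) ((i : Nat) : Int) ((j : Nat) : Int) stA.2).1 + 0,
             (dfsA (grid.length : Int) ((grid.headD []).length : Int)
              (pvCountOnes stA.2 + 1) ((i : Nat) : Int) ((j : Nat) : Int) stA.2).2) := by
        simp [runSeq]
      rw [hrs] at hf1 hf2
      simp only at hf1 hf2
      refine ⟨?_, ?_, hf3⟩
      · simp only [hf1, hfst]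
        omega
      · exact hf2.symm
    · rw [if_neg (by rw [hread, hpyat]; exact hone)]
      rw [if_neg (by rintro ⟨h1, h2⟩; rw [hgetd] at h1; exact hone h1)]
      exact ⟨hfst, hsnd, hgood⟩
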